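-- pv_equiv track=rewrite | github.com/Offblink/Vibe-Coding | 整除关系偏序图生成器.py | compute_direct_edges
-- ===== SOURCE A (Python) =====
-- from typing import List, Dict, Set, Tuple
--
-- def compute_direct_edges(numbers: List[int]) -> List[Tuple[int, int]]:
--     """计算直接整除关系（哈斯图边）"""
--     edges = []
--     n = len(numbers)
--
--     for i in range(n):
--         for j in range(i + 1, n):
--             if numbers[j] % numbers[i] == 0:
--                 # 检查是否直接关系
--                 is_direct = True
--                 for k in range(i + 1, j):
--                     if (numbers[j] % numbers[k] == 0 and
--                         numbers[k] % numbers[i] == 0):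
--                         is_direct = False
--                         break
--                 if is_direct:
--                     edges.append((numbers[i], numbers[j]))
--
--     return edges
-- ===== SOURCE B (Python) =====
-- def compute_direct_edges(numbers):
--     """计算直接整除关系（哈斯图边）"""
--     n = len(numbers)
--     # j-major pass: for each j, build the index-ordered list of divisors of numbers[j]
--     # occurring before it; a divisor is a cover predecessor iff no LATER divisor in that
--     # list is a multiple of it.  Edges go into per-i buckets; flattening the buckets
--     # restores A's i-major emission order.
--     buckets = [[] for _ in range(n)]
--     for j in range(n):
--         divisors = [i for i in range(j) if numbers[j] % numbers[i] == 0]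
--         m = len(divisors)
--         for idx in range(m):
--             vi = numbers[divisors[idx]]
--             direct = True
--             for t in range(idx + 1, m):
--                 if numbers[divisors[t]] % vi == 0:
--                     direct = False
--                     break
--             if direct:
--                 buckets[divisors[idx]].append((vi, numbers[j]))
--     return [e for bucket in buckets for e in bucket]
-- ===== Notes on version B (the rewrite author's own statement) =====
-- stated objective: alternative
-- what changed: B inverts A's i-major triple scan into a j-major pass that builds each j's divisor-index list once, keeps a divisor as a cover predecessor iff no later entry of that list is a multiple of it, and accumulates edges in per-i buckets flattened at the end to restore the output order.
import Mathlib
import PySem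

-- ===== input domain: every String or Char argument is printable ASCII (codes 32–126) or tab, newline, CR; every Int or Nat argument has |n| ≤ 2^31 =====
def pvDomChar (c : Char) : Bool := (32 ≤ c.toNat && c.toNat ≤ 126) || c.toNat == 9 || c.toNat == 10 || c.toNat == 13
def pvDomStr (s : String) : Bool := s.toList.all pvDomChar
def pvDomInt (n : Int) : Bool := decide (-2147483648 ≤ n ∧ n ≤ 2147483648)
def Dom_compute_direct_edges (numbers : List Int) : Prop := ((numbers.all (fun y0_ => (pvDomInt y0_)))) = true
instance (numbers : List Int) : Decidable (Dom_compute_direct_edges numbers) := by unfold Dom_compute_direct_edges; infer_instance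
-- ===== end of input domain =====

-- B inverts the loop structure: a j-major pass builds per-j divisor lists and per-i edge
-- buckets that are flattened at the end (alternative decomposition; return value only).


-- ===== PORT A =====
def compute_direct_edges (numbers : List Int) : List (Int × Int) :=
  let n : Int := numbers.length
  (PySem.List.pyRange 0 n 1).foldl (fun edges i =>
    (PySem.List.pyRange (i+1) n 1).foldl (fun edges j =>
      if PySem.Int.mod (PySem.List.pyGetD numbers j 0) (PySem.List.pyGetD numbers i 0) == 0 then
        -- 'for k … break' leaves is_direct False iff some k in range(i+1, j) relays
        let is_direct := !((PySem.List.pyRange (i+1) j 1).any (fun k =>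
          PySem.Int.mod (PySem.List.pyGetD numbers j 0) (PySem.List.pyGetD numbers k 0) == 0 &&
          PySem.Int.mod (PySem.List.pyGetD numbers k 0) (PySem.List.pyGetD numbers i 0) == 0))
        if is_direct then edges ++ [(PySem.List.pyGetD numbers i 0, PySem.List.pyGetD numbers j 0)]
        else edges
      else edges) edges) []

-- ===== PORT B =====
def compute_direct_edges_alt (numbers : List Int) : List (Int × Int) :=
  let n : Int := numbers.length
  let buckets0 : List (List (Int × Int)) := (PySem.List.pyRange 0 n 1).map (fun _ => [])
  let buckets := (PySem.List.pyRange 0 n 1).foldl (fun buckets j =>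
    let divisors := (PySem.List.pyRange 0 j 1).filter (fun i =>
      PySem.Int.mod (PySem.List.pyGetD numbers j 0) (PySem.List.pyGetD numbers i 0) == 0)
    let m : Int := divisors.length
    (PySem.List.pyRange 0 m 1).foldl (fun buckets idx =>
      let i := PySem.List.pyGetD divisors idx 0
      -- 'for t … break' leaves direct False iff some later divisor relays
      if !((PySem.List.pyRange (idx+1) m 1).any (fun t =>
            PySem.Int.mod (PySem.List.pyGetD numbers (PySem.List.pyGetD divisors t 0) 0)
              (PySem.List.pyGetD numbers i 0) == 0)) then
        -- buckets[i].append((numbers[i], numbers[j])); i is a valid index here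
        PySem.List.pySetD buckets i ((PySem.List.pyGetD buckets i []) ++
          [(PySem.List.pyGetD numbers i 0, PySem.List.pyGetD numbers j 0)])
      else buckets) buckets) buckets0
  -- [e for bucket in buckets for e in bucket]
  buckets.foldl (fun edges bucket => bucket.foldl (fun edges e => edges ++ [e]) edges) []

-- ===== PRECONDITION & SPEC =====
-- Pre_ excludes lists with a 0 anywhere but the last position: there Python's '%' raises
-- ZeroDivisionError in A (and in B's divisor pass alike), so A returns on exactly these inputs.
def Pre_compute_direct_edges (numbers : List Int) : Prop := (numbers.dropLast.all (fun x => x ≠ 0)) = true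
instance (numbers : List Int) : Decidable (Pre_compute_direct_edges numbers) := by unfold Pre_compute_direct_edges; infer_instance
def pvWitness_compute_direct_edges : List Int := [2, 4, 8, 6]
def Spec_compute_direct_edges (numbers : List Int) (out : List (Int × Int)) : Prop := out = compute_direct_edges_alt numbers
instance (numbers : List Int) (out : List (Int × Int)) : Decidable (Spec_compute_direct_edges numbers out) := by unfold Spec_compute_direct_edges; infer_instance

-- ===== CLAIM (what is proved, stated in full; the proofs are below) =====
def Claim_equal_compute_direct_edges : Prop := ∀ (numbers : List Int), Dom_compute_direct_edges numbers → Pre_compute_direct_edges numbers → Spec_compute_direct_edges numbers (compute_direct_edges numbers)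

-- ===== LEMMAS AND PROOFS =====

-- proof-only abbreviations
def pvA (numbers : List Int) (i : Int) : Int := PySem.List.pyGetD numbers i 0
def pvCond (numbers : List Int) (i j : Int) : Bool :=
  (PySem.Int.mod (pvA numbers j) (pvA numbers i) == 0) &&
  !((PySem.List.pyRange (i+1) j 1).any (fun k =>
    PySem.Int.mod (pvA numbers j) (pvA numbers k) == 0 &&
    PySem.Int.mod (pvA numbers k) (pvA numbers i) == 0))
def pvDivs (numbers : List Int) (j : Int) : List Int :=
  (PySem.List.pyRange 0 j 1).filter (fun i =>
    PySem.Int.mod (pvA numbers j) (pvA numbers i) == 0)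
def pvChk (numbers : List Int) (j i : Int) : Bool :=
  !((pvDivs numbers j).any (fun k => decide (i < k) &&
    (PySem.Int.mod (pvA numbers k) (pvA numbers i) == 0)))
def pvQb (numbers : List Int) (i j : Int) : Bool :=
  decide (i ∈ pvDivs numbers j) && pvChk numbers j i

theorem pvA_eq (numbers : List Int) :
    compute_direct_edges numbers
      = (PySem.List.pyRange 0 (numbers.length : Int) 1).flatMap (fun i =>
          ((PySem.List.pyRange (i+1) (numbers.length : Int) 1).filter (pvCond numbers i)).map
            (fun j => (pvA numbers i, pvA numbers j))) := by
  unfold compute_direct_edges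
  dsimp only
  have h1 : ∀ (acc : List (Int × Int)) (i : Int), i ∈ PySem.List.pyRange 0 (numbers.length : Int) 1 →
      (PySem.List.pyRange (i+1) (numbers.length : Int) 1).foldl (fun edges j =>
        if PySem.Int.mod (PySem.List.pyGetD numbers j 0) (PySem.List.pyGetD numbers i 0) == 0 then
          let is_direct := !((PySem.List.pyRange (i+1) j 1).any (fun k =>
            PySem.Int.mod (PySem.List.pyGetD numbers j 0) (PySem.List.pyGetD numbers k 0) == 0 &&
            PySem.Int.mod (PySem.List.pyGetD numbers k 0) (PySem.List.pyGetD numbers i 0) == 0))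
          if is_direct then edges ++ [(PySem.List.pyGetD numbers i 0, PySem.List.pyGetD numbers j 0)]
          else edges
        else edges) acc
      = acc ++ ((PySem.List.pyRange (i+1) (numbers.length : Int) 1).filter (pvCond numbers i)).map
            (fun j => (pvA numbers i, pvA numbers j)) := by
    intro acc i _
    rw [PySem.List.foldl_congr_mem (g := fun edges j =>
      if pvCond numbers i j then edges ++ [(pvA numbers i, pvA numbers j)] else edges)]
    · exact PySem.List.foldl_append_if _ _ _ _
    · intro acc' j _
      simp only [pvCond, pvA, Bool.and_eq_true]
      by_cases h : (PySem.Int.mod (PySem.List.pyGetD numbers j 0) (PySem.List.pyGetD numbers i 0) == 0) = true <;>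
        simp [h]
  refine (PySem.List.foldl_congr_mem _ _ _ _ h1).trans ?_
  rw [PySem.List.foldl_append_eq_flatMap]
  simp

theorem pv_set_map_rng {X : Type} (n : Int) (g : Int → X) (i0 : Int) (h0 : 0 ≤ i0) (x : X) :
    PySem.List.pySetD ((PySem.List.pyRange 0 n 1).map g) i0 x
      = (PySem.List.pyRange 0 n 1).map (fun i => if i = i0 then x else g i) := by
  rw [PySem.List.pySetD_of_nonneg (h := h0)]
  apply List.ext_getElem
  · simp
  · intro k hk1 hk2
    have hk : (k : Int) < n := by
      have := hk2; simp [PySem.List.length_pyRange_one] at this; omega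
    rw [List.getElem_set, List.getElem_map, PySem.List.getElem_pyRange_one]
    by_cases h : i0.toNat = k
    · have he : (0 : Int) + (k : Int) = i0 := by omega
      simp [h, he]
    · have he : ¬ ((0 : Int) + (k : Int) = i0) := by omega
      simp [h, List.getElem_map, PySem.List.getElem_pyRange_one]
      intro hc; omega

theorem pv_fold_set (n : Int) (L : List Int) (hnd : L.Nodup)
    (hL : ∀ i ∈ L, 0 ≤ i ∧ i < n) (chk : Int → Bool) (v : Int → Int × Int)
    (g : Int → List (Int × Int)) :
    L.foldl (fun b i => if chk i then
        PySem.List.pySetD b i ((PySem.List.pyGetD b i []) ++ [v i]) else b)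
      ((PySem.List.pyRange 0 n 1).map g)
    = (PySem.List.pyRange 0 n 1).map (fun i =>
        if i ∈ L ∧ chk i = true then g i ++ [v i] else g i) := by
  induction L generalizing g with
  | nil => simp
  | cons i0 L' ih =>
    have hi0 := hL i0 (by simp)
    have hnotmem : i0 ∉ L' := (List.nodup_cons.mp hnd).1
    have hnd' := (List.nodup_cons.mp hnd).2
    have hL' : ∀ i ∈ L', 0 ≤ i ∧ i < n := fun i hi => hL i (by simp [hi])
    rw [List.foldl_cons]
    by_cases hc : chk i0 = true
    · rw [if_pos hc,
        PySem.List.pyGetD_map_pyRange_of_nonneg _ _ _ _ hi0.1 hi0.2,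
        pv_set_map_rng n g i0 hi0.1,
        ih hnd' hL']
      apply List.map_congr_left
      intro i hi
      by_cases h : i = i0
      · subst h
        simp [hnotmem, hc]
      · simp [h, List.mem_cons]
    · rw [if_neg hc, ih hnd' hL']
      apply List.map_congr_left
      intro i hi
      by_cases h : i = i0
      · subst h
        simp [hnotmem, fun hh => hc hh]
      · simp [h, List.mem_cons]

theorem pv_outer (numbers : List Int) (js : List Int)
    (hjs : ∀ j ∈ js, j ≤ (numbers.length : Int)) (g : Int → List (Int × Int)) :
    js.foldl (fun buckets j =>
      (pvDivs numbers j).foldl (fun buckets i =>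
        if pvChk numbers j i then
          PySem.List.pySetD buckets i ((PySem.List.pyGetD buckets i []) ++
            [(pvA numbers i, pvA numbers j)])
        else buckets) buckets)
      ((PySem.List.pyRange 0 (numbers.length : Int) 1).map g)
    = (PySem.List.pyRange 0 (numbers.length : Int) 1).map (fun i =>
        g i ++ (js.filter (fun j => pvQb numbers i j)).map (fun j => (pvA numbers i, pvA numbers j))) := by
  induction js generalizing g with
  | nil => simp
  | cons j js' ih =>
    have hj := hjs j (by simp)
    have hjs' : ∀ j' ∈ js', j' ≤ (numbers.length : Int) := fun j' h => hjs j' (by simp [h])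
    have hnd : (pvDivs numbers j).Nodup :=
      (PySem.List.nodup_pyRange_one 0 j).filter _
    have hb : ∀ i ∈ pvDivs numbers j, 0 ≤ i ∧ i < (numbers.length : Int) := by
      intro i hi
      have := List.mem_of_mem_filter hi
      rw [PySem.List.mem_pyRange_one] at this
      omega
    rw [List.foldl_cons,
      pv_fold_set (numbers.length : Int) (pvDivs numbers j) hnd hb
        (pvChk numbers j) (fun i => (pvA numbers i, pvA numbers j)) g,
      ih hjs']
    apply List.map_congr_left
    intro i hi
    by_cases h : i ∈ pvDivs numbers j ∧ pvChk numbers j i = true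
    · have hq : pvQb numbers i j = true := by simp [pvQb, h.1, h.2]
      simp [h, hq]
    · have hq : ¬ pvQb numbers i j = true := by
        simpa [pvQb] using h
      simp [h, hq]

theorem pv_any_drop {L : List Int} (hs : L.Pairwise (· < ·)) (P : Int → Bool) (k : Nat) (hk : k < L.length) :
    (PySem.List.pyRange ((k : Int)+1) (L.length : Int) 1).any (fun t => P (PySem.List.pyGetD L t 0))
      = L.any (fun x => decide (L[k] < x) && P x) := by
  have hmap := PySem.List.map_pyGetD_pyRange (xs := L) (a := (k : Int) + 1) (d := 0) (by omega)
  have hL : ((k : Int) + 1).toNat = k + 1 := by omega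
  rw [hL] at hmap
  have hlhs : (PySem.List.pyRange ((k : Int)+1) (L.length : Int) 1).any (fun t => P (PySem.List.pyGetD L t 0))
      = (L.drop (k+1)).any P := by
    rw [← hmap, List.any_map]
    rfl
  rw [hlhs]
  have hmono := List.pairwise_iff_getElem.mp hs
  obtain ⟨v, hv⟩ : ∃ v, L[k] = v := ⟨_, rfl⟩
  rw [hv]
  conv_rhs => rw [← List.take_append_drop (k+1) L]
  rw [List.any_append]
  have htake : (L.take (k+1)).any (fun x => decide (v < x) && P x) = false := by
    rw [List.any_eq_false]
    intro x hx
    obtain ⟨s, hs1, hs2⟩ := List.mem_iff_getElem.mp hx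
    have hsl : s ≤ k := by simp at hs1; omega
    have hsL : s < L.length := by simp at hs1; omega
    have hs2' : L[s]'hsL = x := by rw [← hs2, List.getElem_take]
    have hnlt : ¬ (v < x) := by
      rcases Nat.lt_or_ge s k with h | h
      · have := hmono s k hsL hk h
        rw [hs2', hv] at this
        omega
      · have hsk : s = k := by omega
        subst hsk
        have hxv : x = v := hs2'.symm.trans hv
        omega
    simp [hnlt]
  have hdrop : (L.drop (k+1)).any (fun x => decide (v < x) && P x) = (L.drop (k+1)).any P := by
    apply PySem.List.any_congr_mem
    intro x hx
    obtain ⟨s, hs1, hs2⟩ := List.mem_iff_getElem.mp hx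
    rw [List.getElem_drop] at hs2
    have hlt : v < x := by
      rw [← hs2, ← hv]
      exact hmono k (k+1+s) hk (by simp at hs1; omega) (by omega)
    simp [hlt]
  rw [htake, hdrop, Bool.false_or]

theorem pv_idx_fold (numbers : List Int) (j : Int) (b : List (List (Int × Int))) :
    (PySem.List.pyRange 0 ((pvDivs numbers j).length : Int) 1).foldl (fun buckets idx =>
      if !((PySem.List.pyRange (idx+1) ((pvDivs numbers j).length : Int) 1).any (fun t =>
            PySem.Int.mod (PySem.List.pyGetD numbers (PySem.List.pyGetD (pvDivs numbers j) t 0) 0)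
              (PySem.List.pyGetD numbers (PySem.List.pyGetD (pvDivs numbers j) idx 0) 0) == 0)) then
        PySem.List.pySetD buckets (PySem.List.pyGetD (pvDivs numbers j) idx 0)
          ((PySem.List.pyGetD buckets (PySem.List.pyGetD (pvDivs numbers j) idx 0) []) ++
            [(PySem.List.pyGetD numbers (PySem.List.pyGetD (pvDivs numbers j) idx 0) 0,
              PySem.List.pyGetD numbers j 0)])
      else buckets) b
    = (pvDivs numbers j).foldl (fun buckets i =>
        if pvChk numbers j i then
          PySem.List.pySetD buckets i ((PySem.List.pyGetD buckets i []) ++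
            [(pvA numbers i, pvA numbers j)])
        else buckets) b := by
  have hs : (pvDivs numbers j).Pairwise (· < ·) :=
    (PySem.List.pairwise_lt_pyRange_one 0 j).filter _
  set L := pvDivs numbers j with hLdef
  have hse := PySem.List.enumerate_eq_map_pyRange (xs := L) (d := 0)
  -- left side as a fold over the enumerate
  have h1 : (PySem.List.pyRange 0 ((L.length : Int)) 1).foldl (fun buckets idx =>
      if !((PySem.List.pyRange (idx+1) ((L.length : Int)) 1).any (fun t =>
            PySem.Int.mod (PySem.List.pyGetD numbers (PySem.List.pyGetD L t 0) 0)
              (PySem.List.pyGetD numbers (PySem.List.pyGetD L idx 0) 0) == 0)) then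
        PySem.List.pySetD buckets (PySem.List.pyGetD L idx 0)
          ((PySem.List.pyGetD buckets (PySem.List.pyGetD L idx 0) []) ++
            [(PySem.List.pyGetD numbers (PySem.List.pyGetD L idx 0) 0,
              PySem.List.pyGetD numbers j 0)])
      else buckets) b
      = (PySem.List.enumerate L 0).foldl (fun buckets p =>
          if !((PySem.List.pyRange (p.1+1) ((L.length : Int)) 1).any (fun t =>
                PySem.Int.mod (PySem.List.pyGetD numbers (PySem.List.pyGetD L t 0) 0)
                  (PySem.List.pyGetD numbers p.2 0) == 0)) then
            PySem.List.pySetD buckets p.2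
              ((PySem.List.pyGetD buckets p.2 []) ++
                [(PySem.List.pyGetD numbers p.2 0, PySem.List.pyGetD numbers j 0)])
          else buckets) b := by
    rw [hse]
    simp only [PySem.List.len_eq, List.foldl_map]
  rw [h1]
  have h2 : ∀ (acc : List (List (Int × Int))) (p : Int × Int), p ∈ PySem.List.enumerate L 0 →
      (if !((PySem.List.pyRange (p.1+1) ((L.length : Int)) 1).any (fun t =>
            PySem.Int.mod (PySem.List.pyGetD numbers (PySem.List.pyGetD L t 0) 0)
              (PySem.List.pyGetD numbers p.2 0) == 0)) then
        PySem.List.pySetD acc p.2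
          ((PySem.List.pyGetD acc p.2 []) ++
            [(PySem.List.pyGetD numbers p.2 0, PySem.List.pyGetD numbers j 0)])
      else acc)
      = (if pvChk numbers j p.2 then
          PySem.List.pySetD acc p.2 ((PySem.List.pyGetD acc p.2 []) ++
            [(pvA numbers p.2, pvA numbers j)])
        else acc) := by
    intro acc p hp
    obtain ⟨k, hk, hpk⟩ := (PySem.List.mem_enumerate_iff _ _ _).mp hp
    subst hpk
    simp only [zero_add]
    rw [pv_any_drop hs (fun x => PySem.Int.mod (PySem.List.pyGetD numbers x 0)
      (PySem.List.pyGetD numbers (L[k]'hk) 0) == 0) k hk]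
    rfl
  refine (PySem.List.foldl_congr_mem _ _ _ _ h2).trans ?_
  conv_rhs => rw [← PySem.List.map_snd_enumerate L 0]
  rw [List.foldl_map]

theorem pvB_eq (numbers : List Int) :
    compute_direct_edges_alt numbers
      = (PySem.List.pyRange 0 (numbers.length : Int) 1).flatMap (fun i =>
          ((PySem.List.pyRange 0 (numbers.length : Int) 1).filter (pvQb numbers i)).map
            (fun j => (pvA numbers i, pvA numbers j))) := by
  unfold compute_direct_edges_alt
  dsimp only
  have hstep : ∀ (b : List (List (Int × Int))) (j : Int),
      j ∈ PySem.List.pyRange 0 (numbers.length : Int) 1 →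
      (PySem.List.pyRange 0 (((PySem.List.pyRange 0 j 1).filter (fun i =>
          PySem.Int.mod (PySem.List.pyGetD numbers j 0) (PySem.List.pyGetD numbers i 0) == 0)).length : Int) 1).foldl
        (fun buckets idx =>
          if !((PySem.List.pyRange (idx+1) (((PySem.List.pyRange 0 j 1).filter (fun i =>
                PySem.Int.mod (PySem.List.pyGetD numbers j 0) (PySem.List.pyGetD numbers i 0) == 0)).length : Int) 1).any (fun t =>
                PySem.Int.mod (PySem.List.pyGetD numbers (PySem.List.pyGetD ((PySem.List.pyRange 0 j 1).filter (fun i =>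
                  PySem.Int.mod (PySem.List.pyGetD numbers j 0) (PySem.List.pyGetD numbers i 0) == 0)) t 0) 0)
                  (PySem.List.pyGetD numbers (PySem.List.pyGetD ((PySem.List.pyRange 0 j 1).filter (fun i =>
                    PySem.Int.mod (PySem.List.pyGetD numbers j 0) (PySem.List.pyGetD numbers i 0) == 0)) idx 0) 0) == 0)) then
            PySem.List.pySetD buckets (PySem.List.pyGetD ((PySem.List.pyRange 0 j 1).filter (fun i =>
                PySem.Int.mod (PySem.List.pyGetD numbers j 0) (PySem.List.pyGetD numbers i 0) == 0)) idx 0)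
              ((PySem.List.pyGetD buckets (PySem.List.pyGetD ((PySem.List.pyRange 0 j 1).filter (fun i =>
                PySem.Int.mod (PySem.List.pyGetD numbers j 0) (PySem.List.pyGetD numbers i 0) == 0)) idx 0) []) ++
                [(PySem.List.pyGetD numbers (PySem.List.pyGetD ((PySem.List.pyRange 0 j 1).filter (fun i =>
                  PySem.Int.mod (PySem.List.pyGetD numbers j 0) (PySem.List.pyGetD numbers i 0) == 0)) idx 0) 0,
                  PySem.List.pyGetD numbers j 0)])
          else buckets) b
      = (pvDivs numbers j).foldl (fun buckets i =>
          if pvChk numbers j i then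
            PySem.List.pySetD buckets i ((PySem.List.pyGetD buckets i []) ++
              [(pvA numbers i, pvA numbers j)])
          else buckets) b := by
    intro b j _
    have := pv_idx_fold numbers j b
    simp only [pvDivs, pvA] at this
    exact this
  have hfold := (PySem.List.foldl_congr_mem _ _ _ _ hstep).trans
    (pv_outer numbers (PySem.List.pyRange 0 (numbers.length : Int) 1)
      (fun j hj => ((PySem.List.mem_pyRange_one).mp hj).2.le) (fun _ => []))
  rw [hfold]
  have h2 : ∀ (acc : List (Int × Int)) (bucket : List (Int × Int)),
        bucket ∈ (PySem.List.pyRange 0 (numbers.length : Int) 1).map (fun i =>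
          [] ++ (List.filter (fun j => pvQb numbers i j) (PySem.List.pyRange 0 (numbers.length : Int) 1)).map
            (fun j => (pvA numbers i, pvA numbers j))) →
        bucket.foldl (fun edges e => edges ++ [e]) acc = acc ++ bucket :=
      fun acc bucket _ => PySem.List.foldl_append_singleton_eq_self _ _
  refine (PySem.List.foldl_congr_mem _ _ _ _ h2).trans ?_
  rw [PySem.List.foldl_append_eq_flatten]
  simp [List.flatMap_def]

theorem pv_point (numbers : List Int) (i j : Int) (h0 : 0 ≤ i) (hij : i < j) :
    pvQb numbers i j = pvCond numbers i j := by
  rw [Bool.eq_iff_iff]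
  simp only [pvQb, pvCond, pvChk, pvDivs, Bool.and_eq_true, Bool.not_eq_true',
    List.any_eq_false, List.mem_filter, PySem.List.mem_pyRange_one, decide_eq_true_iff]
  constructor
  · exact fun h => ⟨h.1.2, fun x hx hc => h.2 x ⟨⟨by omega, hx.2⟩, hc.1⟩ ⟨by omega, hc.2⟩⟩
  · exact fun h => ⟨⟨⟨h0, hij⟩, h.1⟩, fun x hx hc => h.2 x ⟨by omega, hx.1.2⟩ ⟨hx.2, hc.2⟩⟩

theorem pvQb_false_of_le (numbers : List Int) (i j : Int) (hji : j ≤ i) :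
    pvQb numbers i j = false := by
  have hmem : i ∉ pvDivs numbers j := by
    intro hmem
    have := List.mem_of_mem_filter hmem
    rw [PySem.List.mem_pyRange_one] at this
    omega
  simp [pvQb, hmem]

theorem pv_filter_eq (numbers : List Int) (i : Int) (hi : 0 ≤ i) :
    (PySem.List.pyRange 0 (numbers.length : Int) 1).filter (pvQb numbers i)
      = (PySem.List.pyRange (i+1) (numbers.length : Int) 1).filter (pvCond numbers i) := by
  by_cases hn : i + 1 ≤ (numbers.length : Int)
  · rw [PySem.List.pyRange_one_append 0 (i+1) _ (by omega) hn, List.filter_append]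
    have hz : (PySem.List.pyRange 0 (i+1) 1).filter (pvQb numbers i) = [] := by
      rw [List.filter_eq_nil_iff]
      intro a ha
      rw [PySem.List.mem_pyRange_one] at ha
      simp [pvQb_false_of_le numbers i a (by omega)]
    rw [hz, List.nil_append]
    exact List.filter_congr (fun j hj =>
      pv_point numbers i j hi (by
        have := (PySem.List.mem_pyRange_one).mp hj; omega))
  · rw [PySem.List.pyRange_one_eq_nil (a := i+1) (by omega), List.filter_nil,
      List.filter_eq_nil_iff]
    intro a ha
    rw [PySem.List.mem_pyRange_one] at ha
    simp [pvQb_false_of_le numbers i a (by omega)]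

theorem compute_direct_edges_eq (numbers : List Int) :
    compute_direct_edges numbers = compute_direct_edges_alt numbers := by
  rw [pvA_eq, pvB_eq]
  simp only [List.flatMap_def]
  apply congrArg List.flatten
  apply List.map_congr_left
  intro i hi
  rw [pv_filter_eq numbers i ((PySem.List.mem_pyRange_one.mp hi).1)]

-- ===== VERDICT (by name: the statement is the Claim_ definition above) =====
theorem compute_direct_edges_spec : Claim_equal_compute_direct_edges := by
  intro numbers _ _
  exact (compute_direct_edges_eq numbers).symm ▸ rfl
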